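-- pv_equiv track=rewrite | github.com/coleschuelke/UQ_spring_2026 | utils/ASE379L_UQ_PCE.py | getMultiIndex
-- ===== SOURCE A (Python) =====
-- def getMultiIndex( deg, dim ) :
--   '''
--   Get all possible combinations of polynomial sums that yield a maximum
--   degree of deg and use a multivariate basis of dimension dim
--
--   Inputs
--   ---------
--   deg - (int) maximum degree of each element of the multi-index
--   dim - (int) dimension of each element of the multi-index
--
--   Outputs
--   ---------
--   scheme - (tuple) tuple of tuples defining the set of multi-indices
--
--   '''
--
--   #  Define the sort function used to decide the order of the multiindices
--   def sortFcn( a, b ) :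
--     asum = 0
--     bsum = 0
--     for i in range( 0, len(a) ) :
--       asum += a[i]
--       bsum += b[i]
--     if asum > bsum : return 1
--     elif asum < bsum : return -1
--     else :
--       if max(a) > max(b) : return 1
--       elif max(a) < max(b) : return -1
--       for i in range( 0, len(a) ) :
--         if a[i] > b[i] : return -1
--         elif a[i] < b[i] : return 1
--         else : continue
--
--   #
--   #  The scheme has not been generated yet.  Here, we generate the set of
--   #  multiindices.  For this, we use the algorithm presented in "Spectral
--   #  Methods for Uncertainty Quantification with Applications to Computational
--   #  Fluid Dynamics" by Olivier P. LeMaitre and Omar M. Knio, pp. 516-517.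
--   #
--
--   #  Set the element for the 0-degree polynomials
--   multiIndices = [[0]*dim]
--
--   #  Set the elements for the polynomials of degree 1
--   if deg >= 1 :
--     for i in range( dim ) :
--       newElem = [0]*dim
--       newElem[i] = 1
--       multiIndices.append( newElem )
--
--   #  Now, we generate the elements for higher degree polynomials.  This
--   #  algorithm is based on the pseudocode in the above reference.
--   P = dim
--   Pi_p = [1]*dim
--   Pi = [0]*dim
--   for k in range( 2, deg+1 ) :
--     L = P
--     Pi = [0]*dim
--     for i in range( 0, dim ) :
--       for m in range( i, dim ) :
--         Pi[i] += Pi_p[m]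
--     for j in range( 0, dim ) :
--       for m in range( L-Pi[j]+1, L+1 ) :
--         multiIndices.append([0]*dim)
--         P += 1
--         for i in range( 0, dim ) :
--           multiIndices[P][i] = multiIndices[m][i]
--         multiIndices[-1][j] += 1
--     Pi_p = list( Pi )
--
--   #  Now that we have the sorted set, we now convert the elements from list
--   #  to tuples.  This ensures that it cannot be altered by any other means.
--   scheme = []
--   for set in multiIndices :
--     scheme.append( tuple(set) )
--
--   #  Done!
--   return scheme
-- ===== SOURCE B (Python) =====
-- def getMultiIndex(deg, dim):
--     '''Same multi-index set as A: graded by total degree, within each degree in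
--     descending-lexicographic order, generated by direct recursive enumeration.'''
--
--     def comps(budget, slots):
--         # all length-`slots` tuples of nonnegative ints summing to `budget`,
--         # first coordinate descending
--         if slots <= 0:
--             return [()] if budget == 0 else []
--         out = []
--         for first in range(budget, -1, -1):
--             for rest in comps(budget - first, slots - 1):
--                 out.append((first,) + rest)
--         return out
--
--     scheme = [(0,) * dim]
--     for k in range(1, deg + 1):
--         scheme.extend(comps(k, dim))
--     return scheme
-- ===== Notes on version B (the rewrite author's own statement) =====
-- stated objective: simpler
-- what changed: A builds each degree level with the LeMaitre-Knio buffer recurrence (P/Pi/Pi_p counters, appending copies of earlier rows by index and bumping one coordinate); B instead seeds the zero tuple and directly enumerates, for each k in 1..deg, every length-dim tuple summing to k by a recursive helper that picks the first coordinate from k down to 0, which reproduces the same graded, within-degree order.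
import Mathlib
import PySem

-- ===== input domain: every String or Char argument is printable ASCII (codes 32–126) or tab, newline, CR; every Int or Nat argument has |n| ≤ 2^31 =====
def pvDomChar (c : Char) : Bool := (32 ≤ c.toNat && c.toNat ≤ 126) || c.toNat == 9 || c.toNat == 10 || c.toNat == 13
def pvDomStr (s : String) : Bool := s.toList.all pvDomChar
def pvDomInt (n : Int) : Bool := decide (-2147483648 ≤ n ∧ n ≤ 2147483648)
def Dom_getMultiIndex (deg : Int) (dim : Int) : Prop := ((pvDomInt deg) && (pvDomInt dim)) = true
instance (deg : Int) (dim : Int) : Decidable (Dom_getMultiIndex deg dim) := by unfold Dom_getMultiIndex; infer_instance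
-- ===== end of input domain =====

-- B replaces A's LeMaitre–Knio copy-and-increment buffer recurrence by a direct recursive
-- enumeration of the compositions of each total degree (objective: simpler).


-- ===== PORT A =====
-- inner Pi-accumulation loop of A (the nested `for i` / `for m` loops building Pi)
def gmiPiLoop (dim : Int) (Pi_p : List Int) : List Int :=
  (PySem.List.pyRange 0 dim 1).foldl (fun Pi i =>
    (PySem.List.pyRange i dim 1).foldl (fun Pi m =>
      PySem.List.pySetD Pi i (PySem.List.pyGetD Pi i 0 + PySem.List.pyGetD Pi_p m 0)) Pi)
    (PySem.List.pyRepeat [0] dim)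

-- body of A's innermost `for m` loop: append a zero row, copy row m into it, bump column j.
-- All indices are in range whenever this runs (Python would raise IndexError otherwise,
-- which never happens for int inputs), so the total pyGetD/pySetD forms are exact.
def gmiInnerM (dim : Int) (mi : List (List Int)) (P : Int) (j m : Int) :
    List (List Int) × Int :=
  let mi := mi ++ [PySem.List.pyRepeat [0] dim]
  let P := P + 1
  let mi := (PySem.List.pyRange 0 dim 1).foldl (fun mi i =>
      PySem.List.pySetD mi P
        (PySem.List.pySetD (PySem.List.pyGetD mi P [])
          i (PySem.List.pyGetD (PySem.List.pyGetD mi m []) i 0))) mi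
  let last := PySem.List.pyGetD mi (-1) []
  let mi := PySem.List.pySetD mi (-1)
      (PySem.List.pySetD last j (PySem.List.pyGetD last j 0 + 1))
  (mi, P)

-- one iteration of A's `for k` loop (the body never reads k itself)
def gmiKStep (dim : Int) (st : List (List Int) × Int × List Int) :
    List (List Int) × Int × List Int :=
  let L := st.2.1
  let Pi := gmiPiLoop dim st.2.2
  let mp := (PySem.List.pyRange 0 dim 1).foldl (fun (mp : List (List Int) × Int) j =>
      (PySem.List.pyRange (L - PySem.List.pyGetD Pi j 0 + 1) (L + 1) 1).foldl
        (fun mp m => gmiInnerM dim mp.1 mp.2 j m) mp)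
      (st.1, st.2.1)
  (mp.1, mp.2, Pi)

-- A's nested `sortFcn` is defined but never called; dead code, not ported.
def getMultiIndex (deg : Int) (dim : Int) : List (List Int) :=
  let multiIndices : List (List Int) := [PySem.List.pyRepeat [0] dim]
  let multiIndices : List (List Int) :=
    if deg ≥ 1 then
      (PySem.List.pyRange 0 dim 1).foldl (fun acc i =>
        acc ++ [PySem.List.pySetD (PySem.List.pyRepeat [0] dim) i 1]) multiIndices
    else multiIndices
  let st := (PySem.List.pyRange 2 (deg + 1) 1).foldl
      (fun st _k => gmiKStep dim st)
      (multiIndices, (dim : Int), PySem.List.pyRepeat [1] dim)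
  st.1.foldl (fun scheme s => scheme ++ [s]) []

-- ===== PORT B =====
-- Source B's `comps(budget, slots)`: all length-`slots` tuples of nonnegative ints summing to
-- `budget`, first coordinate descending.  The structural recursion counts the remaining
-- slots with a Nat (slots ≤ 0 is the base case, exactly as in Source B).
def compsAux (budget : Int) : Nat → List (List Int)
  | 0 => if budget = 0 then [[]] else []
  | n + 1 =>
    (PySem.List.pyRange budget (-1) (-1)).foldl (fun out first =>
      out ++ (compsAux (budget - first) n).map (fun rest => first :: rest)) []

def comps (budget : Int) (slots : Int) : List (List Int) := compsAux budget slots.toNat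

def getMultiIndex_alt (deg : Int) (dim : Int) : List (List Int) :=
  (PySem.List.pyRange 1 (deg + 1) 1).foldl (fun scheme k => scheme ++ comps k dim)
    [PySem.List.pyRepeat [0] dim]

-- ===== PRECONDITION & SPEC =====
def Spec_getMultiIndex (deg : Int) (dim : Int) (out : List (List Int)) : Prop := out = getMultiIndex_alt deg dim
instance (deg : Int) (dim : Int) (out : List (List Int)) : Decidable (Spec_getMultiIndex deg dim out) := by unfold Spec_getMultiIndex; infer_instance

-- ===== CLAIM (what is proved, stated in full; the proofs are below) =====
def Claim_equal_getMultiIndex : Prop := ∀ (deg : Int) (dim : Int), Dom_getMultiIndex deg dim → Spec_getMultiIndex deg dim (getMultiIndex deg dim)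

-- ===== LEMMAS AND PROOFS =====

theorem compsAux_flat (b : Int) (s : Nat) :
    compsAux b (s + 1) =
      (PySem.List.pyRange b (-1) (-1)).flatMap
        (fun f => (compsAux (b - f) s).map (fun rest => f :: rest)) := by
  rw [compsAux, PySem.List.foldl_append_eq_flatMap]
  simp

theorem desc_snoc {b : Int} (hb : 0 ≤ b) :
    PySem.List.pyRange b (-1) (-1) = PySem.List.pyRange b 0 (-1) ++ [0] := by
  rw [PySem.List.pyRange_neg_one, PySem.List.pyRange_neg_one]
  have h1 : (b - -1).toNat = b.toNat + 1 := by omega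
  have h2 : (b - 0).toNat = b.toNat := by omega
  rw [h1, h2, List.range_succ, List.map_append]
  simp; omega

theorem desc_shift {b : Int} (hb : 0 ≤ b) :
    PySem.List.pyRange b 0 (-1) = (PySem.List.pyRange (b - 1) (-1) (-1)).map (· + 1) := by
  rw [PySem.List.pyRange_neg_one, PySem.List.pyRange_neg_one, List.map_map]
  have h1 : (b - 0).toNat = b.toNat := by omega
  have h2 : (b - 1 - -1).toNat = b.toNat := by omega
  rw [h1, h2]
  apply List.map_congr_left
  intro k _
  simp; omega

theorem compsAux_zero_budget : ∀ s, compsAux 0 s = [List.replicate s (0 : Int)] := by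
  intro s
  induction s with
  | zero => simp [compsAux]
  | succ n ih =>
    rw [compsAux_flat]
    have : PySem.List.pyRange 0 (-1) (-1) = [0] := by decide
    rw [this]
    simp [ih, List.replicate_succ]

theorem length_of_mem_compsAux' {b : Int} {s : Nat} {xs : List Int}
    (h : xs ∈ compsAux b s) : xs.length = s := by
  induction s generalizing b xs with
  | zero =>
    simp [compsAux] at h
    rcases h with ⟨-, h⟩
    simp [h]
  | succ n ih =>
    rw [compsAux_flat] at h
    simp only [List.mem_flatMap, List.mem_map] at h
    obtain ⟨f, -, rest, hr, rfl⟩ := h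
    simp [ih hr]

theorem compsAux_snoc_split {b : Int} (hb : 0 ≤ b) (s : Nat) :
    compsAux b (s + 1) =
      (PySem.List.pyRange b 0 (-1)).flatMap
          (fun f => (compsAux (b - f) s).map (fun rest => f :: rest)) ++
        (compsAux b s).map (fun rest => (0 : Int) :: rest) := by
  rw [compsAux_flat, desc_snoc hb, List.flatMap_append]
  simp

def mbump : List Int → List Int
  | [] => []
  | h :: t => (h + 1) :: t

theorem compsAux_pascal {b : Int} (hb : 1 ≤ b) (s : Nat) :
    compsAux b (s + 1) =
      (compsAux (b - 1) (s + 1)).map mbump ++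
        (compsAux b s).map (fun rest => (0 : Int) :: rest) := by
  rw [compsAux_snoc_split (by omega) s, compsAux_flat (b - 1) s]
  congr 1
  rw [desc_shift (by omega), List.flatMap_map, List.map_flatMap]
  apply List.flatMap_congr
  intro g hg
  have hg0 : 0 ≤ g := by
    rw [PySem.List.mem_pyRange_neg_one] at hg
    omega

  rw [List.map_map]
  have : b - 1 - g = b - (g + 1) := by ring
  rw [this]
  apply List.map_congr_left
  intro rest hr
  cases rest <;> simp [mbump]

theorem compsAux_suffix_step {b : Int} (hb : 0 ≤ b) (s : Nat) :
    ∃ pre, compsAux b (s + 1) = pre ++ (compsAux b s).map (fun rest => (0 : Int) :: rest) :=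
  ⟨_, compsAux_snoc_split hb s⟩

theorem compsAux_suffix {b : Int} (hb : 0 ≤ b) :
    ∀ (j s : Nat), j ≤ s →
      ∃ pre, compsAux b s = pre ++ (compsAux b (s - j)).map (fun xs => List.replicate j (0 : Int) ++ xs) := by
  intro j
  induction j with
  | zero => intro s _; exact ⟨[], by simp⟩
  | succ i ih =>
    intro s hs
    obtain ⟨pre, hpre⟩ := ih s (by omega)
    obtain ⟨s', hs'⟩ : ∃ s', s - i = s' + 1 := ⟨s - i - 1, by omega⟩
    obtain ⟨pre2, hpre2⟩ := compsAux_suffix_step hb s'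
    refine ⟨pre ++ pre2.map (fun xs => List.replicate i (0 : Int) ++ xs), ?_⟩
    have hss : s - (i + 1) = s' := by omega
    rw [hpre, hs', hpre2, hss, List.map_append, List.map_map, List.append_assoc]
    congr 1
    congr 1
    apply List.map_congr_left
    intro xs _
    simp [List.replicate_succ']

def cntI (b : Int) (s : Nat) : Int := ((compsAux b s).length : Int)

theorem cntI_pascal {b : Int} (hb : 1 ≤ b) (s : Nat) :
    cntI b (s + 1) = cntI (b - 1) (s + 1) + cntI b s := by
  unfold cntI
  rw [compsAux_pascal hb s]
  simp

theorem cntI_zero_slots {b : Int} (hb : 1 ≤ b) : cntI b 0 = 0 := by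
  unfold cntI
  simp [compsAux]
  omega

theorem cntI_tele {b : Int} (hb : 1 ≤ b) :
    ∀ s : Nat, ((List.range s).map (fun t => cntI (b - 1) (s - t))).sum = cntI b s := by
  intro s
  induction s with
  | zero => simp [cntI_zero_slots hb]
  | succ n ih =>
    rw [List.range_succ_eq_map, List.map_cons, List.map_map, List.sum_cons]
    have h2 : (List.map ((fun t => cntI (b - 1) (n + 1 - t)) ∘ (· + 1)) (List.range n)).sum
        = ((List.range n).map (fun t => cntI (b - 1) (n - t))).sum := by
      congr 1
      apply List.map_congr_left
      intro t ht
      simp only [Function.comp]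
      congr 1
      omega
    rw [h2, ih]
    simp only [Nat.sub_zero]
    exact (cntI_pascal hb n).symm

theorem compsAux_grouping {k : Int} (hk : 1 ≤ k) :
    ∀ d : Nat, compsAux k d =
      (List.range d).flatMap
        (fun j => (compsAux (k - 1) (d - j)).map (fun xs => List.replicate j (0 : Int) ++ mbump xs)) := by
  intro d
  induction d with
  | zero =>
    simp [compsAux]
    omega
  | succ n ih =>
    rw [compsAux_pascal hk n, List.range_succ_eq_map, List.flatMap_cons, List.flatMap_map]
    have hA : (compsAux (k - 1) (n + 1)).map mbump
        = (compsAux (k - 1) (n + 1 - 0)).map (fun xs => List.replicate 0 (0 : Int) ++ mbump xs) := by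
      simp
    have hB : (compsAux k n).map (fun rest => (0 : Int) :: rest)
        = (List.range n).flatMap (fun a =>
            (compsAux (k - 1) (n + 1 - (a + 1))).map
              (fun xs => List.replicate (a + 1) (0 : Int) ++ mbump xs)) := by
      rw [ih, List.map_flatMap]
      apply List.flatMap_congr
      intro t ht
      rw [List.map_map]
      have hnt : n + 1 - (t + 1) = n - t := by omega
      rw [hnt]
      apply List.map_congr_left
      intro xs hxs
      simp [List.replicate_succ]
    rw [hB]
    exact congrArg₂ (· ++ ·) hA rfl

theorem set_replicate_eq (d j : Nat) (hj : j < d) :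
    (List.replicate d (0 : Int)).set j 1 =
      List.replicate j 0 ++ 1 :: List.replicate (d - j - 1) 0 := by
  induction j generalizing d with
  | zero =>
    obtain ⟨m, rfl⟩ : ∃ m, d = m + 1 := ⟨d - 1, by omega⟩
    simp [List.replicate_succ]
  | succ i ih =>
    obtain ⟨m, rfl⟩ : ∃ m, d = m + 1 := ⟨d - 1, by omega⟩
    rw [List.replicate_succ, List.set_cons_succ, ih m (by omega)]
    simp [List.replicate_succ]

theorem compsAux_one (d : Nat) :
    compsAux 1 d = (List.range d).map (fun i => (List.replicate d (0 : Int)).set i 1) := by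
  rw [compsAux_grouping le_rfl d]
  have h1 : ∀ j ∈ List.range d,
      (compsAux (1 - 1) (d - j)).map (fun xs => List.replicate j (0 : Int) ++ mbump xs)
        = [(List.replicate d (0 : Int)).set j 1] := by
    intro j hj
    simp only [List.mem_range] at hj
    rw [show (1 : Int) - 1 = 0 from rfl, compsAux_zero_budget]
    obtain ⟨m, hm⟩ : ∃ m, d - j = m + 1 := ⟨d - j - 1, by omega⟩
    rw [hm, List.replicate_succ]
    simp only [List.map_cons, List.map_nil]
    rw [set_replicate_eq d j hj]
    have hdm : d - j - 1 = m := by omega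
    rw [hdm]
    norm_num [mbump]
  rw [List.flatMap_congr h1]
  exact (List.map_eq_flatMap).symm

theorem pyGetD_nonneg {α : Type} (xs : List α) {i : Int} (hi : 0 ≤ i) (d : α) :
    PySem.List.pyGetD xs i d = xs.getD i.toNat d := by
  obtain ⟨n, rfl⟩ : ∃ n : Nat, i = (n : Int) := ⟨i.toNat, by omega⟩
  simp [List.getD_eq_getElem?_getD]

theorem foldl_set_add {α : Type} (g : α → Int) (i : Nat) :
    ∀ (l : List α) (xs : List Int),
      l.foldl (fun ys m => ys.set i (ys.getD i 0 + g m)) xs =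
        xs.set i (xs.getD i 0 + (l.map g).sum) := by
  intro l
  induction l with
  | nil =>
    intro xs
    simp only [List.foldl_nil, List.map_nil, List.sum_nil, Int.add_zero]
    by_cases h : i < xs.length
    · rw [List.getD_eq_getElem _ _ (by simpa using h)]
      exact (List.set_getElem_self (by simpa using h)).symm
    · rw [List.set_eq_of_length_le (by omega)]
  | cons a t ih =>
    intro xs
    simp only [List.foldl_cons, List.map_cons, List.sum_cons]
    rw [ih]
    by_cases h : i < xs.length
    · have hl : i < (xs.set i (xs.getD i 0 + g a)).length := by simpa using h
      have h1 : (xs.set i (xs.getD i 0 + g a)).getD i 0 = xs.getD i 0 + g a := by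
        rw [List.getD_eq_getElem _ _ hl]
        simp
      rw [h1, List.set_set]
      ring_nf
    · rw [List.set_eq_of_length_le (by simp only [List.length_set]; omega),
        List.set_eq_of_length_le (by omega), List.set_eq_of_length_le (by omega)]

-- running prefix of the outer Pi loop
theorem range_fold_set (spec : Nat → Int) (d : Nat) :
    ∀ t, t ≤ d →
      (List.range t).foldl (fun Pi i => Pi.set i (Pi.getD i 0 + spec i)) (List.replicate d 0) =
        (List.range t).map spec ++ List.replicate (d - t) 0 := by
  intro t
  induction t with
  | zero => simp
  | succ n ih =>
    intro h
    rw [List.range_succ, List.foldl_append, ih (by omega)]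
    simp only [List.foldl_cons, List.foldl_nil]
    have hlen : ((List.range n).map spec).length = n := by simp
    obtain ⟨m, hm⟩ : ∃ m, d - n = m + 1 := ⟨d - n - 1, by omega⟩
    have hd : ((List.range n).map spec ++ List.replicate (d - n) 0).getD n 0 = 0 := by
      rw [List.getD_eq_getElem?_getD, List.getElem?_append_right (by omega)]
      rw [hlen, hm]
      simp
    rw [hd, List.set_append_right _ _ (by omega), hlen, Nat.sub_self]
    rw [hm, List.replicate_succ, List.set_cons_zero, List.map_append]
    simp only [List.map_cons, List.map_nil, List.append_assoc, List.cons_append,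
      List.nil_append]
    have h2 : d - (n + 1) = m := by omega
    rw [h2, Int.zero_add]


theorem gmiPiLoop_eval (d : Nat) (q : List Int) (hq : q.length = d) :
    gmiPiLoop (d : Int) q = (List.range d).map (fun i => (q.drop i).sum) := by
  unfold gmiPiLoop
  rw [PySem.List.pyRepeat_singleton]
  simp only [Int.toNat_natCast]
  rw [PySem.List.pyRange_one]
  simp only [Int.sub_zero, Int.toNat_natCast, zero_add]
  rw [List.foldl_map]
  have hbody : ∀ (Pi : List Int) (i : Nat), i ∈ List.range d →
      (PySem.List.pyRange (i : Int) (d : Int) 1).foldl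
        (fun Pi m => PySem.List.pySetD Pi (i : Int)
          (PySem.List.pyGetD Pi (i : Int) 0 + PySem.List.pyGetD q m 0)) Pi =
      Pi.set i (Pi.getD i 0 + (q.drop i).sum) := by
    intro Pi i _
    have hb : ∀ (ys : List Int) (m : Int), m ∈ PySem.List.pyRange (i : Int) (d : Int) 1 →
        PySem.List.pySetD ys (i : Int)
            (PySem.List.pyGetD ys (i : Int) 0 + PySem.List.pyGetD q m 0)
          = ys.set i (ys.getD i 0 + PySem.List.pyGetD q m 0) := by
      intro ys m _
      simp
    rw [PySem.List.foldl_congr_mem _ _ _ _ hb, foldl_set_add]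
    have hsum : ((PySem.List.pyRange (i : Int) (d : Int) 1).map
        (fun m => PySem.List.pyGetD q m 0)).sum = (q.drop i).sum := by
      have h3 := PySem.List.map_pyGetD_pyRange' q 0 (a := (i : Int)) (by omega)
      rw [hq] at h3
      rw [h3]
      simp
    rw [hsum]
  rw [PySem.List.foldl_congr_mem _ _ _ _ (fun acc x hx => hbody acc x hx)]
  have := range_fold_set (fun i => (q.drop i).sum) d d le_rfl
  rw [this, Nat.sub_self]
  simp

def piL (K : Int) (d : Nat) : List Int := (List.range d).map (fun i => cntI K (d - i))

theorem gmiPiLoop_piL {K : Int} (hK : 0 ≤ K) (d : Nat) :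
    gmiPiLoop (d : Int) (piL K d) = piL (K + 1) d := by
  rw [gmiPiLoop_eval d (piL K d) (by simp [piL])]
  unfold piL
  apply List.map_congr_left
  intro i hi
  simp only [List.mem_range] at hi
  have htele := cntI_tele (b := K + 1) (by omega) (d - i)
  have hK1 : K + 1 - 1 = K := by ring
  rw [hK1] at htele
  rw [← htele]
  congr 1
  rw [← List.map_drop, List.range_eq_range', List.drop_range', List.range'_eq_map_range]
  simp only [Nat.zero_add, Nat.one_mul, List.map_map]
  apply List.map_congr_left
  intro u hu
  simp only [List.mem_range, Nat.sub_zero] at hu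
  simp only [Function.comp]
  congr 1
  omega

theorem copy_fold_aux (v : List Int) :
    ∀ (t : Nat) (e : List Int), t ≤ v.length → e.length = v.length →
      (List.range t).foldl (fun e i => e.set i (v.getD i 0)) e = v.take t ++ e.drop t := by
  intro t
  induction t with
  | zero => intro e _ _; simp
  | succ n ih =>
    intro e ht he
    rw [List.range_succ, List.foldl_append, ih e (by omega) he]
    simp only [List.foldl_cons, List.foldl_nil]
    have hn : n < v.length := by omega
    have hne : n < e.length := by omega
    have hlt : (v.take n).length = n := by simp; omega
    rw [List.set_append_right _ _ (by omega), hlt, Nat.sub_self,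
      List.drop_eq_getElem_cons hne, List.set_cons_zero,
      List.getD_eq_getElem _ _ hn]
    rw [List.take_succ_eq_append_getElem hn, List.append_assoc]
    rfl

theorem copy_all (v : List Int) (e : List Int) (he : e.length = v.length) :
    (List.range v.length).foldl (fun e i => e.set i (v.getD i 0)) e = v := by
  rw [copy_fold_aux v v.length e le_rfl he]
  simp [he]

theorem copy_fold (p mq : Nat) (hne : mq ≠ p) :
    ∀ (l : List Nat) (mi : List (List Int)), p < mi.length →
      l.foldl (fun mi2 i => mi2.set p ((mi2.getD p []).set i ((mi2.getD mq []).getD i 0))) mi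
        = mi.set p (l.foldl (fun e i => e.set i ((mi.getD mq []).getD i 0)) (mi.getD p [])) := by
  intro l
  induction l with
  | nil =>
    intro mi hp
    simp only [List.foldl_nil]
    rw [List.getD_eq_getElem _ _ hp]
    exact (List.set_getElem_self hp).symm
  | cons i t ih =>
    intro mi hp
    simp only [List.foldl_cons]
    rw [ih _ (by simpa using hp)]
    have hmq : ((mi.set p ((mi.getD p []).set i ((mi.getD mq []).getD i 0))).getD mq []) =
        mi.getD mq [] := by
      rw [List.getD_eq_getElem?_getD, List.getElem?_set_ne (Ne.symm hne),
        ← List.getD_eq_getElem?_getD]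
    have hgp : ((mi.set p ((mi.getD p []).set i ((mi.getD mq []).getD i 0))).getD p []) =
        (mi.getD p []).set i ((mi.getD mq []).getD i 0) := by
      rw [List.getD_eq_getElem _ _ (by simpa using hp)]
      simp
    rw [hmq, hgp, List.set_set]

theorem pySetD_neg_one_append {α : Type} (xs : List α) (x w : α) :
    PySem.List.pySetD (xs ++ [x]) (-1) w = xs ++ [w] := by
  simp [PySem.List.pySetD, PySem.List.pySet?, PySem.List.pyIdx?]

theorem map_getD_range_self {α : Type} (l : List α) (d : α) :
    (List.range l.length).map (fun i => l.getD i d) = l := by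
  apply List.ext_getElem (by simp)
  intro i h1 h2
  simp only [List.getElem_map, List.getElem_range]
  rw [List.getD_eq_getElem _ _ (by simpa using h2)]


theorem gmiInnerM_eval (d : Nat) (mi : List (List Int)) (j m : Int) (P : Int)
    (hm0 : 0 ≤ m) (hm : m < (mi.length : Int))
    (hrow : (mi.getD m.toNat []).length = d)
    (hP : P = (mi.length : Int) - 1) :
    gmiInnerM (d : Int) mi P j m =
      (mi ++ [PySem.List.pySetD (mi.getD m.toNat [])
                j (PySem.List.pyGetD (mi.getD m.toNat []) j 0 + 1)], P + 1) := by
  have hP1 : P + 1 = (mi.length : Int) := by omega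
  simp only [gmiInnerM]
  rw [PySem.List.pyRepeat_singleton]
  simp only [Int.toNat_natCast]
  rw [PySem.List.pyRange_one]
  simp only [Int.sub_zero, Int.toNat_natCast, zero_add]
  rw [List.foldl_map]
  have hbody : ∀ (mi2 : List (List Int)), ∀ i ∈ List.range d,
      PySem.List.pySetD mi2 (P + 1)
          (PySem.List.pySetD (PySem.List.pyGetD mi2 (P + 1) [])
            ((i : Nat) : Int) (PySem.List.pyGetD (PySem.List.pyGetD mi2 m []) ((i : Nat) : Int) 0))
        = mi2.set mi.length ((mi2.getD mi.length []).set i ((mi2.getD m.toNat []).getD i 0)) := by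
    intro mi2 i _
    rw [hP1, pyGetD_nonneg _ hm0]
    simp [List.getD_eq_getElem?_getD]
  rw [PySem.List.foldl_congr_mem _ _ _ _ hbody]
  rw [copy_fold mi.length m.toNat (by omega) (List.range d) (mi ++ [List.replicate d 0])
    (by simp)]
  have hm' : (mi ++ [List.replicate d (0 : Int)]).getD m.toNat [] = mi.getD m.toNat [] := by
    rw [List.getD_eq_getElem?_getD, List.getElem?_append_left (by omega),
      ← List.getD_eq_getElem?_getD]
  have hN' : (mi ++ [List.replicate d (0 : Int)]).getD mi.length [] = List.replicate d 0 := by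
    rw [List.getD_eq_getElem?_getD, List.getElem?_append_right le_rfl]
    simp
  rw [hm', hN']
  have hinner := copy_all (mi.getD m.toNat []) (List.replicate d 0)
    (by rw [List.length_replicate]; exact hrow.symm)
  rw [hrow] at hinner
  rw [hinner, List.set_append_right _ _ le_rfl, Nat.sub_self, List.set_cons_zero]
  rw [PySem.List.pyGetD_neg_one_append_singleton, pySetD_neg_one_append]

theorem mloop_eval (d : Nat) (j : Int) :
    ∀ (rng : List Int) (mi0 ext : List (List Int)),
      (∀ m ∈ rng, 0 ≤ m ∧ m < (mi0.length : Int)) →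
      (∀ x ∈ mi0, x.length = d) →
      rng.foldl (fun mp m => gmiInnerM (d : Int) mp.1 mp.2 j m)
          (mi0 ++ ext, ((mi0 ++ ext).length : Int) - 1) =
        (mi0 ++ ext ++ rng.map (fun m =>
            PySem.List.pySetD (mi0.getD m.toNat [])
              j (PySem.List.pyGetD (mi0.getD m.toNat []) j 0 + 1)),
          ((mi0 ++ ext).length : Int) - 1 + (rng.length : Int)) := by
  intro rng
  induction rng with
  | nil => intro mi0 ext _ _; simp
  | cons m rest ih =>
    intro mi0 ext hb hlen
    obtain ⟨hm0, hmlt⟩ := hb m (List.mem_cons_self)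
    have hmn : m.toNat < mi0.length := by omega
    have hget : (mi0 ++ ext).getD m.toNat [] = mi0.getD m.toNat [] := by
      rw [List.getD_eq_getElem?_getD, List.getElem?_append_left hmn,
        ← List.getD_eq_getElem?_getD]
    have hrow : ((mi0 ++ ext).getD m.toNat []).length = d := by
      rw [hget, List.getD_eq_getElem _ _ hmn]
      exact hlen _ (List.getElem_mem hmn)
    simp only [List.foldl_cons]
    rw [gmiInnerM_eval d (mi0 ++ ext) j m _ hm0 (by simp; omega) hrow rfl, hget]
    set b := PySem.List.pySetD (mi0.getD m.toNat [])
        j (PySem.List.pyGetD (mi0.getD m.toNat []) j 0 + 1) with hbdef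
    have hpair : ((mi0 ++ ext ++ [b] : List (List Int)),
          ((mi0 ++ ext).length : Int) - 1 + 1) =
        (mi0 ++ (ext ++ [b]), ((mi0 ++ (ext ++ [b])).length : Int) - 1) := by
      refine Prod.ext ?_ ?_
      · simp
      · simp
        omega
    rw [hpair, ih mi0 (ext ++ [b]) (fun x hx => hb x (List.mem_cons_of_mem _ hx)) hlen]
    refine Prod.ext ?_ ?_
    · simp [hbdef, List.getD_eq_getElem?_getD]
    · simp
      omega

theorem map_getD_range (pre suf : List (List Int)) :
    (PySem.List.pyRange (pre.length : Int) ((pre.length : Int) + (suf.length : Int)) 1).map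
        (fun m => (pre ++ suf).getD m.toNat []) = suf := by
  rw [PySem.List.pyRange_one]
  have h1 : ((pre.length : Int) + (suf.length : Int) - (pre.length : Int)).toNat = suf.length := by
    omega
  rw [h1, List.map_map]
  have h2 : ∀ k ∈ List.range suf.length,
      ((fun m => (pre ++ suf).getD m.toNat []) ∘ (fun k : Nat => (pre.length : Int) + (k : Int))) k
        = suf.getD k [] := by
    intro k hk
    simp only [Function.comp]
    have h3 : ((pre.length : Int) + (k : Int)).toNat = pre.length + k := by omega
    rw [h3, List.getD_eq_getElem?_getD, List.getElem?_append_right (by omega)]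
    simp [← List.getD_eq_getElem?_getD]
  rw [List.map_congr_left h2, map_getD_range_self]

def Mfull (d n : Nat) : List (List Int) :=
  List.replicate d (0 : Int) :: (List.range n).flatMap (fun t : Nat => compsAux ((t : Int) + 1) d)

theorem Mfull_succ (d n : Nat) :
    Mfull d (n + 1) = Mfull d n ++ compsAux ((n : Int) + 1) d := by
  unfold Mfull
  rw [List.range_succ, List.flatMap_append]
  simp

theorem Mfull_len_mem (d n : Nat) : ∀ x ∈ Mfull d n, x.length = d := by
  intro x hx
  unfold Mfull at hx
  rcases List.mem_cons.1 hx with h | h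
  · simp [h]
  · obtain ⟨t, -, hx2⟩ := List.mem_flatMap.1 h
    exact length_of_mem_compsAux' hx2

theorem piL_getD (K : Int) (d t : Nat) (ht : t < d) :
    PySem.List.pyGetD (piL K d) (t : Int) 0 = cntI K (d - t) := by
  rw [pyGetD_nonneg _ (by omega)]
  simp only [Int.toNat_natCast, piL]
  rw [List.getD_eq_getElem _ _ (by simpa using ht)]
  simp

theorem jloop_eval (d : Nat) (K : Int)
    (M : List (List Int))
    (hlen : ∀ x ∈ M, x.length = d)
    (hdec : ∀ j, j < d → ∃ bigpre, M = bigpre ++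
      (compsAux K (d - j)).map (fun xs => List.replicate j (0 : Int) ++ xs)) :
    ∀ t, t ≤ d →
      (PySem.List.pyRange 0 (t : Int) 1).foldl
        (fun mp j =>
          (PySem.List.pyRange ((M.length : Int) - 1 - PySem.List.pyGetD (piL K d) j 0 + 1)
              ((M.length : Int) - 1 + 1) 1).foldl
            (fun mp m => gmiInnerM (d : Int) mp.1 mp.2 j m) mp)
        (M, (M.length : Int) - 1)
      = (M ++ (List.range t).flatMap
            (fun j => (compsAux K (d - j)).map (fun xs => List.replicate j (0 : Int) ++ mbump xs)),
         ((M ++ (List.range t).flatMap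
            (fun j => (compsAux K (d - j)).map
              (fun xs => List.replicate j (0 : Int) ++ mbump xs))).length : Int) - 1) := by
  intro t
  induction t with
  | zero => simp
  | succ n ih =>
    intro hnd
    have hcast : ((n + 1 : Nat) : Int) = (n : Int) + 1 := by push_cast; ring
    rw [hcast, PySem.List.pyRange_one_succ_right (by omega), List.foldl_append, ih (by omega)]
    simp only [List.foldl_cons, List.foldl_nil]
    -- process j = n
    obtain ⟨bigpre, hbig⟩ := hdec n (by omega)
    set sfx := (compsAux K (d - n)).map (fun xs => List.replicate n (0 : Int) ++ xs) with hsfx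
    have hMlen : M.length = bigpre.length + sfx.length := by rw [hbig]; simp
    have hc : PySem.List.pyGetD (piL K d) ((n : Nat) : Int) 0 = (sfx.length : Int) := by
      rw [piL_getD K d n (by omega)]
      simp [cntI, hsfx]
    rw [hc]
    have hrng : PySem.List.pyRange ((M.length : Int) - 1 - (sfx.length : Int) + 1)
          ((M.length : Int) - 1 + 1) 1
        = PySem.List.pyRange (bigpre.length : Int)
            ((bigpre.length : Int) + (sfx.length : Int)) 1 := by
      congr 1 <;> omega
    rw [hrng]
    set rng := PySem.List.pyRange (bigpre.length : Int)
        ((bigpre.length : Int) + (sfx.length : Int)) 1 with hrngd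
    set ext := (List.range n).flatMap
      (fun j => (compsAux K (d - j)).map (fun xs => List.replicate j (0 : Int) ++ mbump xs))
      with hext
    have hbounds : ∀ m ∈ rng, 0 ≤ m ∧ m < (M.length : Int) := by
      intro m hm
      rw [hrngd, PySem.List.mem_pyRange_one] at hm
      omega
    rw [mloop_eval d ((n : Nat) : Int) rng M ext hbounds hlen]
    have h1 : rng.map (fun m => M.getD m.toNat []) = sfx := by
      rw [hrngd, hbig]
      exact map_getD_range bigpre sfx
    have h2 : rng.map (fun m => PySem.List.pySetD (M.getD m.toNat []) ((n : Nat) : Int)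
          (PySem.List.pyGetD (M.getD m.toNat []) ((n : Nat) : Int) 0 + 1))
        = (rng.map (fun m => M.getD m.toNat [])).map
            (fun row => PySem.List.pySetD row ((n : Nat) : Int)
              (PySem.List.pyGetD row ((n : Nat) : Int) 0 + 1)) := by
      simp
    have h3 : sfx.map (fun row => PySem.List.pySetD row ((n : Nat) : Int)
          (PySem.List.pyGetD row ((n : Nat) : Int) 0 + 1))
        = (compsAux K (d - n)).map (fun xs => List.replicate n (0 : Int) ++ mbump xs) := by
      rw [hsfx, List.map_map]
      apply List.map_congr_left
      intro xs hxs
      have hxl : xs.length = d - n := length_of_mem_compsAux' hxs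
      obtain ⟨h, tl, rfl⟩ : ∃ h tl, xs = h :: tl := by
        cases xs with
        | nil => exfalso; simp at hxl; omega
        | cons h tl => exact ⟨h, tl, rfl⟩
      simp only [Function.comp]
      have hget : PySem.List.pyGetD (List.replicate n (0 : Int) ++ h :: tl) ((n : Nat) : Int) 0
          = h := by
        rw [pyGetD_nonneg _ (by omega)]
        simp only [Int.toNat_natCast]
        rw [List.getD_eq_getElem?_getD, List.getElem?_append_right (by simp)]
        simp
      rw [hget]
      rw [show PySem.List.pySetD (List.replicate n (0 : Int) ++ h :: tl) ((n : Nat) : Int) (h + 1)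
          = (List.replicate n (0 : Int) ++ h :: tl).set n (h + 1) from by simp]
      rw [List.set_append_right _ _ (by simp), List.length_replicate, Nat.sub_self,
        List.set_cons_zero]
      rfl
    have hrlen : rng.length = sfx.length := by
      rw [hrngd, PySem.List.length_pyRange_one]
      omega
    rw [h2, h1, h3]
    rw [List.range_succ, List.flatMap_append]
    simp only [List.flatMap_cons, List.flatMap_nil, List.append_nil]
    refine Prod.ext ?_ ?_
    · simp [List.append_assoc]
      exact hext
    · have h5 : rng.length = (compsAux K (d - n)).length := by rw [hrlen, hsfx]; simp
      have h6 : ext.length = ((List.range n).map (fun a => (compsAux K (d - a)).length)).sum := by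
        rw [hext, List.length_flatMap]
        congr 1
        apply List.map_congr_left
        intro a _
        simp
      have h7 : ((List.range n).map
            (Nat.cast ∘ fun a => (compsAux K (d - a)).length)).sum = (ext.length : Int) := by
        rw [h6, Nat.cast_list_sum, List.map_map]
      simp
      omega


theorem gmiKStep_eval (d : Nat) (K : Int) (hK : 1 ≤ K) (n : Nat) (hn : (n : Int) = K) :
    gmiKStep (d : Int) (Mfull d n, ((Mfull d n).length : Int) - 1, piL (K - 1) d)
      = (Mfull d (n + 1), ((Mfull d (n + 1)).length : Int) - 1, piL K d) := by
  have hPi : gmiPiLoop (d : Int) (piL (K - 1) d) = piL K d := by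
    have h := gmiPiLoop_piL (K := K - 1) (by omega) d
    rw [sub_add_cancel] at h
    exact h
  obtain ⟨m0, hm0⟩ : ∃ m0, n = m0 + 1 := ⟨n - 1, by omega⟩
  have hm0K : ((m0 : Int) + 1) = K := by omega
  have hMsucc : Mfull d n = Mfull d m0 ++ compsAux K d := by
    rw [hm0, Mfull_succ, hm0K]
  have hdec : ∀ j, j < d → ∃ bigpre, Mfull d n = bigpre ++
      (compsAux K (d - j)).map (fun xs => List.replicate j (0 : Int) ++ xs) := by
    intro j hj
    obtain ⟨pre, hpre⟩ := compsAux_suffix (b := K) (by omega) j d (by omega)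
    exact ⟨Mfull d m0 ++ pre, by rw [hMsucc, hpre, List.append_assoc]⟩
  have hj := jloop_eval d K (Mfull d n) (Mfull_len_mem d n) hdec d le_rfl
  have hgroup : (List.range d).flatMap
      (fun j => (compsAux K (d - j)).map (fun xs => List.replicate j (0 : Int) ++ mbump xs))
      = compsAux (K + 1) d := by
    have h := compsAux_grouping (k := K + 1) (by omega) d
    rw [show K + 1 - 1 = K from by ring] at h
    exact h.symm
  have hM1 : Mfull d n ++ (List.range d).flatMap
      (fun j => (compsAux K (d - j)).map (fun xs => List.replicate j (0 : Int) ++ mbump xs))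
      = Mfull d (n + 1) := by
    rw [hgroup, Mfull_succ, hn]
  simp only [gmiKStep, hPi]
  rw [hj, hM1]

theorem kloop_eval (d : Nat) :
    ∀ K : Nat, 1 ≤ K →
      (PySem.List.pyRange 2 ((K : Int) + 1) 1).foldl (fun st _k => gmiKStep (d : Int) st)
          (Mfull d 1, ((Mfull d 1).length : Int) - 1, piL 0 d)
        = (Mfull d K, ((Mfull d K).length : Int) - 1, piL ((K : Int) - 1) d) := by
  intro K
  induction K with
  | zero => intro h; omega
  | succ m ih =>
    intro _
    by_cases hm : 1 ≤ m
    · have hc1 : ((m + 1 : Nat) : Int) + 1 = ((m : Int) + 1) + 1 := by push_cast; ring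
      rw [hc1, PySem.List.pyRange_one_succ_right (by omega), List.foldl_append, ih hm]
      simp only [List.foldl_cons, List.foldl_nil]
      rw [gmiKStep_eval d ((m : Int)) (by omega) m rfl]
      rw [show ((m + 1 : Nat) : Int) - 1 = (m : Int) from by push_cast; ring]
    · have hm0 : m = 0 := by omega
      subst hm0
      rw [show ((0 + 1 : Nat) : Int) + 1 = 2 from by norm_num,
        PySem.List.pyRange_one_eq_nil le_rfl, List.foldl_nil,
        show ((0 + 1 : Nat) : Int) - 1 = 0 from by norm_num]




theorem piL_zero (d : Nat) : piL 0 d = List.replicate d 1 := by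
  unfold piL
  rw [List.eq_replicate_iff]
  constructor
  · simp
  · intro b hb
    obtain ⟨i, -, rfl⟩ := List.mem_map.1 hb
    simp [cntI, compsAux_zero_budget]

theorem Mfull_one (d : Nat) : Mfull d 1 = List.replicate d (0 : Int) ::
    (List.range d).map (fun i => (List.replicate d (0 : Int)).set i 1) := by
  unfold Mfull
  rw [show List.range 1 = [0] from rfl]
  simp [compsAux_one d]

theorem Mfull_one_len (d : Nat) : (Mfull d 1).length = d + 1 := by
  rw [Mfull_one]
  simp

theorem alt_eval (deg dim : Int) (hdeg : 0 ≤ deg) (hdim : 0 ≤ dim) :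
    getMultiIndex_alt deg dim = Mfull dim.toNat deg.toNat := by
  unfold getMultiIndex_alt
  rw [PySem.List.foldl_append_eq_flatMap, PySem.List.pyRepeat_singleton]
  unfold Mfull
  rw [show ([List.replicate dim.toNat (0 : Int)] : List (List Int))
      = (List.replicate dim.toNat (0 : Int)) :: [] from rfl]
  simp only [List.cons_append, List.nil_append]
  congr 1
  rw [PySem.List.pyRange_one, show deg + 1 - 1 = deg from by ring, List.flatMap_map]
  apply List.flatMap_congr
  intro t _
  show comps (1 + (t : Int)) dim = compsAux ((t : Int) + 1) dim.toNat
  unfold comps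
  rw [show (1 : Int) + (t : Int) = (t : Int) + 1 from by ring]

theorem kstep_dim_nonpos (dim : Int) (hdim : dim ≤ 0) (st : List (List Int) × Int × List Int) :
    gmiKStep dim st = (st.1, st.2.1, gmiPiLoop dim st.2.2) := by
  simp only [gmiKStep]
  rw [PySem.List.pyRange_one_eq_nil (by omega)]
  simp

theorem kloop_dim_nonpos (dim : Int) (hdim : dim ≤ 0) :
    ∀ (l : List Int) (mi : List (List Int)) (P : Int) (q : List Int),
      (l.foldl (fun st _k => gmiKStep dim st) (mi, P, q)).1 = mi := by
  intro l
  induction l with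
  | nil => intro mi P q; rfl
  | cons a t ih =>
    intro mi P q
    simp only [List.foldl_cons]
    rw [kstep_dim_nonpos dim hdim]
    exact ih mi P _

theorem main_eq (deg dim : Int) : getMultiIndex deg dim = getMultiIndex_alt deg dim := by
  by_cases hdim : dim ≤ 0
  · -- dim ≤ 0 : both sides are [[]] (the singleton holding the empty row)
    unfold getMultiIndex getMultiIndex_alt
    dsimp only
    rw [PySem.List.pyRange_one_eq_nil (hdim : dim ≤ 0)]
    simp only [List.foldl_nil]
    have hif : (if deg ≥ 1 then ([PySem.List.pyRepeat [0] dim] : List (List Int))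
        else [PySem.List.pyRepeat [0] dim]) = [PySem.List.pyRepeat [0] dim] := by
      split <;> rfl
    rw [hif, kloop_dim_nonpos dim hdim, PySem.List.foldl_append_singleton_eq_self,
      PySem.List.foldl_append_eq_flatMap]
    have hnil : (PySem.List.pyRange 1 (deg + 1) 1).flatMap (fun k => comps k dim) = [] := by
      apply List.flatMap_eq_nil_iff.2
      intro k hk
      rw [PySem.List.mem_pyRange_one] at hk
      unfold comps
      rw [show dim.toNat = 0 from by omega]
      simp [compsAux]
      omega
    rw [hnil]
    simp
  · -- dim ≥ 1
    obtain ⟨d, rfl⟩ : ∃ d : Nat, dim = (d : Int) := ⟨dim.toNat, by omega⟩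
    have hd1 : 1 ≤ d := by omega
    by_cases hdeg : deg ≥ 1
    · -- deg ≥ 1 : both sides equal Mfull d deg.toNat
      obtain ⟨n, rfl⟩ : ∃ n : Nat, deg = (n : Int) := ⟨deg.toNat, by omega⟩
      rw [alt_eval _ _ (by omega) (by omega)]
      simp only [Int.toNat_natCast]
      unfold getMultiIndex
      dsimp only
      rw [if_pos hdeg, PySem.List.foldl_append_singleton_eq_self, List.nil_append,
        PySem.List.foldl_append_singleton_eq_map]
      have htup : (([PySem.List.pyRepeat [0] ((d : Nat) : Int)] : List (List Int)) ++
            (PySem.List.pyRange 0 ((d : Nat) : Int) 1).map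
              (fun i => PySem.List.pySetD (PySem.List.pyRepeat [0] ((d : Nat) : Int)) i 1),
            ((d : Nat) : Int), PySem.List.pyRepeat [1] ((d : Nat) : Int))
          = (Mfull d 1, ((Mfull d 1).length : Int) - 1, piL 0 d) := by
        refine Prod.ext ?_ (Prod.ext ?_ ?_)
        · show _ = Mfull d 1
          rw [Mfull_one, PySem.List.pyRepeat_singleton, PySem.List.pyRange_one]
          simp only [Int.sub_zero, zero_add, Int.toNat_natCast, List.map_map]
          rw [show ([List.replicate d (0 : Int)] : List (List Int))
              = (List.replicate d (0 : Int)) :: [] from rfl]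
          simp only [List.cons_append, List.nil_append]
          congr 1
          apply List.map_congr_left
          intro i _
          simp [PySem.List.pyRepeat_singleton]
        · show ((d : Nat) : Int) = ((Mfull d 1).length : Int) - 1
          rw [Mfull_one_len]
          push_cast
          omega
        · show PySem.List.pyRepeat [1] ((d : Nat) : Int) = piL 0 d
          rw [piL_zero, PySem.List.pyRepeat_singleton]
          simp
      rw [htup, kloop_eval d n (by omega)]
    · -- deg ≤ 0 : both sides are the singleton initial list
      unfold getMultiIndex getMultiIndex_alt
      dsimp only
      rw [if_neg hdeg,
        PySem.List.pyRange_one_eq_nil (by omega : deg + 1 ≤ 2),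
        PySem.List.pyRange_one_eq_nil (by omega : deg + 1 ≤ 1)]
      simp

-- ===== VERDICT (by name: the statement is the Claim_ definition above) =====
theorem getMultiIndex_spec : Claim_equal_getMultiIndex := by
  intro deg dim _
  unfold Spec_getMultiIndex
  exact main_eq deg dim
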